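-- pv_equiv track=rewrite | github.com/eovelar/AyED1-2024-TPs | TP3/TP3_ejercicio5.py | butacas_contiguas
-- ===== SOURCE A (Python) =====
-- def butacas_contiguas(sala):
--     """
--     Busca la secuencia más larga de butacas libres contiguas en una misma fila y devuelve las coordenadas de inicio de la misma
--
--     """
--     max_contiguas = 0
--     coordenadas_inicio = (-1, -1)
--     for i in range(len(sala)):
--         contiguas = 0
--         for j in range(len(sala[i])):
--             if sala[i][j] == 0:
--                 contiguas += 1
--                 if contiguas > max_contiguas:
--                     max_contiguas = contiguas
--                     coordenadas_inicio = (i, j - contiguas + 1)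
--             else:
--                 contiguas = 0
--     return coordenadas_inicio
-- ===== SOURCE B (Python) =====
-- def _runs_fila(fila):
--     """Maximal runs of free seats in one row, as (start, length) pairs."""
--     runs = []
--     start = None
--     for j, seat in enumerate(fila):
--         if seat == 0:
--             if start is None:
--                 start = j
--         elif start is not None:
--             runs.append((start, j - start))
--             start = None
--     if start is not None:
--         runs.append((start, len(fila) - start))
--     return runs
--
--
-- def butacas_contiguas(sala):
--     """
--     Busca la secuencia mas larga de butacas libres contiguas en una misma fila
--     y devuelve las coordenadas de inicio de la misma.
--     Staged: materialize every free-seat run of the room, then select the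
--     first run of maximal length (max returns the first maximum).
--     """
--     runs = [(length, i, start)
--             for i, fila in enumerate(sala)
--             for start, length in _runs_fila(fila)]
--     if not runs:
--         return (-1, -1)
--     best = max(runs, key=lambda r: r[0])
--     return (best[1], best[2])
-- ===== Notes on version B (the rewrite author's own statement) =====
-- stated objective: alternative
-- what changed: Replaces A's online per-cell counter (updating the running maximum inside the scan) with a staged pipeline: first materialize the complete list of (length, row, start) free-seat runs of the whole room, then select the first run of maximal length with max(..., key=...).
import Mathlib
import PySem

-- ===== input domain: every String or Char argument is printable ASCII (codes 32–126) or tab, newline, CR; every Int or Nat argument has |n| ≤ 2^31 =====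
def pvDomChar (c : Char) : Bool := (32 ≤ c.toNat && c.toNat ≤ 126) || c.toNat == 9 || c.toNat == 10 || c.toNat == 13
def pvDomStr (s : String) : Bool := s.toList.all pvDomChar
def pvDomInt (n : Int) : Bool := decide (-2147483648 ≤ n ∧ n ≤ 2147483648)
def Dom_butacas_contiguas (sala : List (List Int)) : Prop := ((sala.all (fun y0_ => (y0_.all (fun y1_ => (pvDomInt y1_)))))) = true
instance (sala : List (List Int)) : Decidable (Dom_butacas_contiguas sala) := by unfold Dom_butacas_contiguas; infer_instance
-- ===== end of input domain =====

-- B replaces A's online scan (per-cell counter updating the maximum inside the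
-- scan) with a staged pipeline: materialize all free-seat runs, then pick the
-- first run of maximal length; objective: alternative decomposition, same cost.

-- ===== PORT A =====
-- inner for-loop of A over one row: args (contiguas, j, remaining cells, (max_contiguas, coordenadas_inicio))
def aInner (i : Int) : Int → Int → List Int → Int × Int × Int → Int × Int × Int
  | _, _, [], st => st
  | c, j, x :: xs, st =>
    if x = 0 then
      if c + 1 > st.1 then aInner i (c + 1) (j + 1) xs (c + 1, (i, j - (c + 1) + 1))
      else aInner i (c + 1) (j + 1) xs st
    else aInner i 0 (j + 1) xs st

-- outer for-loop of A over rows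
def aOuter : Int → List (List Int) → Int × Int × Int → Int × Int × Int
  | _, [], st => st
  | i, fila :: rest, st => aOuter (i + 1) rest (aInner i 0 0 fila st)

def butacas_contiguas (sala : List (List Int)) : Int × Int :=
  (aOuter 0 sala (0, (-1, -1))).2

-- ===== PORT B =====
-- B's helper _runs_fila: one pass with state (accumulated runs, open-run start);
-- first argument is the enumerate index j (at the end it equals len(fila), used by the flush)
def runsAux : Int → List Int → Option Int → List (Int × Int) → List (Int × Int)
  | _, [], none, runs => runs
  | n, [], some s, runs => runs ++ [(s, n - s)]
  | j, x :: xs, start, runs =>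
    if x = 0 then
      match start with
      | none => runsAux (j + 1) xs (some j) runs
      | some s => runsAux (j + 1) xs (some s) runs
    else
      match start with
      | none => runsAux (j + 1) xs none runs
      | some s => runsAux (j + 1) xs none (runs ++ [(s, j - s)])

def runsFila (fila : List Int) : List (Int × Int) := runsAux 0 fila none []

-- the comprehension: [(length, i, start) for i, fila in enumerate(sala) for start, length in _runs_fila(fila)]
def bRows : Int → List (List Int) → List (Int × Int × Int)
  | _, [] => []
  | i, fila :: rest => (runsFila fila).map (fun p => (p.2, i, p.1)) ++ bRows (i + 1) rest

-- max(runs, key=lambda r: r[0]): the FIRST element with maximal key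
def pickMax : Int × Int × Int → List (Int × Int × Int) → Int × Int × Int
  | b, [] => b
  | b, r :: rs => pickMax (if r.1 > b.1 then r else b) rs

def butacas_contiguas_alt (sala : List (List Int)) : Int × Int :=
  match bRows 0 sala with
  | [] => (-1, -1)
  | r :: rs => ((pickMax r rs).2.1, (pickMax r rs).2.2)

-- ===== PRECONDITION & SPEC =====
def Spec_butacas_contiguas (sala : List (List Int)) (out : Int × Int) : Prop := out = butacas_contiguas_alt sala
instance (sala : List (List Int)) (out : Int × Int) : Decidable (Spec_butacas_contiguas sala out) := by unfold Spec_butacas_contiguas; infer_instance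

-- ===== CLAIM (what is proved, stated in full; the proofs are below) =====
def Claim_equal_butacas_contiguas : Prop := ∀ (sala : List (List Int)), Dom_butacas_contiguas sala → Spec_butacas_contiguas sala (butacas_contiguas sala)

-- ===== LEMMAS AND PROOFS =====

-- proof-side reference: leading zeros of a list
def takeZeros : List Int → Nat × List Int
  | [] => (0, [])
  | x :: xs => if x = 0 then ((takeZeros xs).1 + 1, (takeZeros xs).2) else (0, x :: xs)

theorem takeZeros_len : ∀ (l : List Int), (takeZeros l).2.length ≤ l.length := by
  intro l
  induction l with
  | nil => simp [takeZeros]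
  | cons x xs ih =>
    by_cases hx : x = 0 <;> simp [takeZeros, hx] <;> omega

theorem takeZeros_decomp : ∀ (l : List Int),
    l = List.replicate (takeZeros l).1 0 ++ (takeZeros l).2 := by
  intro l
  induction l with
  | nil => simp [takeZeros]
  | cons x xs ih =>
    by_cases hx : x = 0
    · simp [takeZeros, hx, List.replicate_succ]
      exact ih
    · simp [takeZeros, hx]

theorem takeZeros_head : ∀ (l : List Int) (y : Int) (ys : List Int),
    (takeZeros l).2 = y :: ys → y ≠ 0 := by
  intro l
  induction l with
  | nil => intro y ys h; simp [takeZeros] at h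
  | cons x xs ih =>
    intro y ys h
    by_cases hx : x = 0
    · simp [takeZeros, hx] at h
      exact ih y ys h
    · simp [takeZeros, hx] at h
      intro hy; exact hx (h.1 ▸ hy)

-- proof-side reference: the (start, length) runs of a row, via takeZeros
def pairsRef : Int → List Int → List (Int × Int)
  | _, [] => []
  | j, x :: xs =>
    if h : x = 0 then
      ((j, ((takeZeros (x :: xs)).1 : Int)) :: pairsRef (j + (takeZeros (x :: xs)).1) (takeZeros (x :: xs)).2)
    else pairsRef (j + 1) xs
termination_by _ l => l.length
decreasing_by
  · simp only [takeZeros, if_pos ‹x = 0›]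
    have := takeZeros_len xs
    simpa using Nat.lt_succ_of_le this
  · simp

-- the common fold step: pickMax's step, also the per-run effect of A's scan
def upd (st r : Int × Int × Int) : Int × Int × Int := if r.1 > st.1 then r else st

theorem pickMax_eq_foldl : ∀ (l : List (Int × Int × Int)) (b : Int × Int × Int),
    pickMax b l = l.foldl upd b := by
  intro l
  induction l with
  | nil => intro b; simp [pickMax]
  | cons r rs ih => intro b; simp [pickMax, upd, ih]

theorem foldl_upd_fst_ge : ∀ (l : List (Int × Int × Int)) (b : Int × Int × Int),
    b.1 ≤ (l.foldl upd b).1 := by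
  intro l
  induction l with
  | nil => intro b; simp
  | cons r rs ih =>
    intro b
    simp only [List.foldl_cons, upd]
    split_ifs with h
    · exact le_trans (le_of_lt h) (ih r)
    · exact ih b

-- every run recorded by pairsRef has length ≥ 1
theorem pairsRef_len_pos : ∀ (n : Nat) (l : List Int), l.length ≤ n →
    ∀ (j : Int) (p : Int × Int), p ∈ pairsRef j l → 1 ≤ p.2 := by
  intro n
  induction n with
  | zero =>
    intro l hl j p hp
    have : l = [] := List.eq_nil_of_length_eq_zero (Nat.le_zero.1 hl)
    subst this; simp [pairsRef] at hp
  | succ n ih =>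
    intro l hl j p hp
    match l with
    | [] => simp [pairsRef] at hp
    | x :: xs =>
      by_cases hx : x = 0
      · rw [pairsRef, dif_pos hx] at hp
        rcases List.mem_cons.1 hp with h | h
        · subst h
          simp only [takeZeros, if_pos hx]
          have : (1 : Int) ≤ ((takeZeros xs).1 + 1 : Nat) := by push_cast; omega
          simpa using this
        · have hlen : (takeZeros (x :: xs)).2.length ≤ n := by
            have h1 := takeZeros_len xs
            simp only [takeZeros, if_pos hx]
            simp at hl; omega
          exact ih _ hlen _ p h
      · rw [pairsRef, dif_neg hx] at hp
        exact ih xs (by simp at hl; omega) (j + 1) p hp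

-- running A's inner loop through a block of k zeros followed by r
theorem aInner_run (i : Int) : ∀ (k : Nat) (r : List Int) (c b j : Int) (co : Int × Int),
    c ≤ b →
    aInner i c j (List.replicate k 0 ++ r) (b, co) =
      aInner i (c + k) (j + k) r
        (if c + (k : Int) > b then (c + (k : Int), (i, j - c)) else (b, co)) := by
  intro k
  induction k with
  | zero =>
    intro r c b j co hcb
    simp [if_neg (not_lt.2 hcb)]
  | succ k ih =>
    intro r c b j co hcb
    simp only [List.replicate_succ, List.cons_append]
    by_cases hc : c + 1 > b
    · simp only [aInner, if_true, if_pos hc]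
      rw [ih r (c + 1) (c + 1) (j + 1) (i, j - (c + 1) + 1) le_rfl]
      have hst : (if c + 1 + (k : Int) > c + 1 then ((c + 1 + (k : Int), (i, j + 1 - (c + 1))) : Int × Int × Int)
          else ((c + 1 : Int), (i, j - (c + 1) + 1)))
          = (c + (((k : Nat) + 1 : Nat) : Int), (i, j - c)) := by
        split_ifs with h
        · simp only [Prod.mk.injEq]
          push_cast
          refine ⟨by ring, trivial, by ring⟩
        · simp only [Prod.mk.injEq]
          push_cast
          refine ⟨by omega, trivial, by ring⟩
      rw [hst]
      have hcond : (c + ((((k : Nat) + 1 : Nat)) : Int) > b) := by push_cast; omega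
      rw [if_pos hcond]
      rw [show c + 1 + (k : Int) = c + (((k : Nat) + 1 : Nat) : Int) from by push_cast; ring,
          show j + 1 + (k : Int) = j + (((k : Nat) + 1 : Nat) : Int) from by push_cast; ring]
    · simp only [aInner, if_true, if_neg hc]
      rw [ih r (c + 1) b (j + 1) co (by omega)]
      rw [show c + 1 + (k : Int) = c + (((k : Nat) + 1 : Nat) : Int) from by push_cast; ring,
          show j + 1 + (k : Int) = j + (((k : Nat) + 1 : Nat) : Int) from by push_cast; ring,
          show j + 1 - (c + 1) = j - c from by ring]

-- A's inner loop = the fold of upd over the triples of the row's runs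
theorem aInner_eq_fold (i : Int) : ∀ (n : Nat) (fila : List Int), fila.length ≤ n →
    ∀ (j b : Int) (co : Int × Int), 0 ≤ b →
    aInner i 0 j fila (b, co)
      = ((pairsRef j fila).map (fun p => (p.2, i, p.1))).foldl upd (b, co) := by
  intro n
  induction n with
  | zero =>
    intro fila hlen j b co hb
    have : fila = [] := List.eq_nil_of_length_eq_zero (Nat.le_zero.1 hlen)
    subst this
    simp [aInner, pairsRef]
  | succ n ih =>
    intro fila hlen j b co hb
    match fila with
    | [] => simp [aInner, pairsRef]
    | x :: xs =>
      by_cases hx : x = 0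
      · have hdec := takeZeros_decomp (x :: xs)
        have hrun := aInner_run i (takeZeros (x :: xs)).1 (takeZeros (x :: xs)).2 0 b j co hb
        conv_lhs => rw [hdec]
        rw [hrun]
        rw [pairsRef, dif_pos hx]
        set t := (takeZeros (x :: xs)).1 with ht
        set r := (takeZeros (x :: xs)).2 with hr
        simp only [List.map_cons, List.foldl_cons]
        have hupd : upd (b, co) ((t : Int), i, j)
            = (if (0 : Int) + (t : Int) > b then ((0 : Int) + (t : Int), (i, j - 0)) else (b, co)) := by
          simp [upd]
        rw [← hupd]
        set st' := upd (b, co) ((t : Int), i, j) with hst'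
        have hst1 : 0 ≤ st'.1 := by
          rw [hst']; unfold upd; split_ifs with h <;> simp <;> omega
        have hrlen : r.length ≤ n := by
          have h1 := takeZeros_len xs
          rw [hr]
          simp only [takeZeros, if_pos hx]
          simp at hlen; omega
        match hre : r with
        | [] => simp [aInner, pairsRef]
        | y :: ys =>
          have hy : y ≠ 0 := takeZeros_head (x :: xs) y ys hr.symm
          rw [show aInner i (0 + (t : Int)) (j + (t : Int)) (y :: ys) st'
              = aInner i 0 (j + (t : Int) + 1) ys st'
              from by rw [aInner]; simp [hy]]
          rw [show pairsRef (j + (t : Int)) (y :: ys) = pairsRef (j + (t : Int) + 1) ys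
              from by rw [pairsRef]; simp [hy]]
          have hys : ys.length ≤ n := by simp at hrlen; omega
          obtain ⟨b', co'⟩ := st'
          exact ih ys hys (j + (t : Int) + 1) b' co' hst1
      · rw [show aInner i 0 j (x :: xs) (b, co) = aInner i 0 (j + 1) xs (b, co)
            from by rw [aInner]; simp [hx]]
        rw [pairsRef, dif_neg hx]
        exact ih xs (by simp at hlen; omega) (j + 1) b co hb

-- B's _runs_fila produces exactly pairsRef
theorem runsAux_eq : ∀ (n : Nat) (l : List Int), l.length ≤ n →
    (∀ (j : Int) (runs : List (Int × Int)),
        runsAux j l none runs = runs ++ pairsRef j l) ∧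
    (∀ (j s : Int) (runs : List (Int × Int)),
        runsAux j l (some s) runs
          = runs ++ (s, j + ((takeZeros l).1 : Int) - s)
              :: pairsRef (j + ((takeZeros l).1 : Int)) (takeZeros l).2) := by
  intro n
  induction n with
  | zero =>
    intro l hl
    have : l = [] := List.eq_nil_of_length_eq_zero (Nat.le_zero.1 hl)
    subst this
    constructor
    · intro j runs; simp [runsAux, pairsRef]
    · intro j s runs; simp [runsAux, takeZeros, pairsRef]
  | succ n ih =>
    intro l hl
    match l with
    | [] =>
      constructor
      · intro j runs; simp [runsAux, pairsRef]
      · intro j s runs; simp [runsAux, takeZeros, pairsRef]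
    | x :: xs =>
      have hxs : xs.length ≤ n := by simp at hl; omega
      constructor
      · intro j runs
        by_cases hx : x = 0
        · rw [show runsAux j (x :: xs) none runs = runsAux (j + 1) xs (some j) runs
              from by rw [runsAux]; simp [hx]]
          rw [(ih xs hxs).2 (j + 1) j runs]
          rw [pairsRef, dif_pos hx]
          simp only [takeZeros, if_pos hx]
          congr 2
          all_goals push_cast
          all_goals ring_nf
        · rw [show runsAux j (x :: xs) none runs = runsAux (j + 1) xs none runs
              from by rw [runsAux]; simp [hx]]
          rw [(ih xs hxs).1 (j + 1) runs]
          rw [pairsRef, dif_neg hx]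
      · intro j s runs
        by_cases hx : x = 0
        · rw [show runsAux j (x :: xs) (some s) runs = runsAux (j + 1) xs (some s) runs
              from by rw [runsAux]; simp [hx]]
          rw [(ih xs hxs).2 (j + 1) s runs]
          simp only [takeZeros, if_pos hx]
          congr 2
          all_goals push_cast
          all_goals ring_nf
        · rw [show runsAux j (x :: xs) (some s) runs
              = runsAux (j + 1) xs none (runs ++ [(s, j - s)])
              from by rw [runsAux]; simp [hx]]
          rw [(ih xs hxs).1 (j + 1) (runs ++ [(s, j - s)])]
          simp only [takeZeros, if_neg hx]
          rw [show pairsRef (j + ((0 : Nat) : Int)) (x :: xs) = pairsRef (j + 1) xs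
              from by rw [show (j + ((0 : Nat) : Int)) = j from by simp, pairsRef, dif_neg hx]]
          simp

theorem runsFila_eq (fila : List Int) : runsFila fila = pairsRef 0 fila := by
  have := (runsAux_eq fila.length fila le_rfl).1 0 []
  simpa [runsFila] using this

-- A's outer loop = the fold of upd over ALL the room's run triples
theorem aOuter_eq_fold : ∀ (rows : List (List Int)) (i : Int) (st : Int × Int × Int), 0 ≤ st.1 →
    aOuter i rows st = (bRows i rows).foldl upd st := by
  intro rows
  induction rows with
  | nil => intro i st _; simp [aOuter, bRows]
  | cons fila rest ih =>
    intro i st hst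
    obtain ⟨b, co⟩ := st
    simp only [aOuter, bRows, List.foldl_append]
    rw [runsFila_eq, aInner_eq_fold i fila.length fila le_rfl 0 b co hst]
    exact ih (i + 1) _ (le_trans hst (foldl_upd_fst_ge _ (b, co)))

-- keys in bRows are ≥ 1
theorem bRows_fst_pos : ∀ (rows : List (List Int)) (i : Int) (r : Int × Int × Int),
    r ∈ bRows i rows → 1 ≤ r.1 := by
  intro rows
  induction rows with
  | nil => intro i r h; simp [bRows] at h
  | cons fila rest ih =>
    intro i r h
    simp only [bRows, List.mem_append, List.mem_map] at h
    rcases h with ⟨p, hp, hpe⟩ | h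
    · rw [runsFila_eq] at hp
      have := pairsRef_len_pos fila.length fila le_rfl 0 p hp
      rw [← hpe]; simpa using this
    · exact ih (i + 1) r h

-- ===== VERDICT (by name: the statement is the Claim_ definition above) =====
theorem butacas_contiguas_spec : Claim_equal_butacas_contiguas := by
  intro sala _
  unfold Spec_butacas_contiguas butacas_contiguas butacas_contiguas_alt
  rw [aOuter_eq_fold sala 0 (0, (-1, -1)) (by norm_num)]
  match h : bRows 0 sala with
  | [] => simp
  | r :: rs =>
    have hr1 : 1 ≤ r.1 := bRows_fst_pos sala 0 r (by rw [h]; exact List.mem_cons_self ..)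
    show (List.foldl upd (0, (-1, -1)) (r :: rs)).2 = ((pickMax r rs).2.1, (pickMax r rs).2.2)
    rw [pickMax_eq_foldl]
    simp only [List.foldl_cons]
    rw [show upd (0, (-1, -1)) r = r from by unfold upd; rw [if_pos (by omega)]]
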